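-- pv_equiv track=rewrite | github.com/cisco/mercury | python/pmercury/utils/eqv_classes.py | clean_hostname
-- ===== SOURCE A (Python) =====
-- tlds = set([])
--
-- def clean_hostname(hostname):
--     if hostname == None or hostname == 'None':
--         return 'None', 'None'
--     tokens_ = hostname.split('.')
--     tld_ = tokens_[-1]
--     tmp_tld_ = tokens_[-1]
--     domain_ = tokens_[-1]
--     tmp_domain_ = tokens_[-1]
--     if len(tokens_) > 1:
--         domain_ = tokens_[-2] + '.' + domain_
--         tmp_domain_ = tokens_[-2] + '.' + tmp_domain_
--     for i in range(2,7):
--         if len(tokens_) < i: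
--             return domain_, tld_
--         if len(tokens_) > i:
--             tmp_domain_ = tokens_[(i+1)*-1] + '.' + tmp_domain_
--         tmp_tld_ = tokens_[i*-1] + '.' + tmp_tld_
--         if tmp_tld_ in tlds:
--             domain_ = tmp_domain_
--             tld_ = tmp_tld_
--
--     return domain_, tld_
-- ===== SOURCE B (Python) =====
-- def clean_hostname(hostname):
--     if hostname is None or hostname == 'None':
--         return 'None', 'None'
--     tokens = hostname.split('.')
--     return '.'.join(tokens[-2:]), tokens[-1]
-- ===== Notes on version B (the rewrite author's own statement) =====
-- stated objective: simpler
-- what changed: The module-level tlds set is empty, so A's 5-iteration suffix-accumulator loop can never match; B drops the loop and directly returns the join of the last two tokens as the domain and the last token as the tld.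
import Mathlib
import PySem

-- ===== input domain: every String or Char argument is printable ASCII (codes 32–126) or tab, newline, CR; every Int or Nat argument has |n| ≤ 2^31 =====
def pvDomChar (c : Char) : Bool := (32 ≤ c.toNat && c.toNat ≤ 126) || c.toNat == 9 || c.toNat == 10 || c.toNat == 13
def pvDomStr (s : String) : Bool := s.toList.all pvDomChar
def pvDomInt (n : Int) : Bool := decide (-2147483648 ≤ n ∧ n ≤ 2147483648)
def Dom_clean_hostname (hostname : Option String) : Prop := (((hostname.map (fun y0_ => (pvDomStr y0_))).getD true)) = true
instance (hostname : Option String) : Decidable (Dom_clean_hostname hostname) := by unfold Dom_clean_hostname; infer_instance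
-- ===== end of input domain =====

-- B drops A's suffix-accumulator loop (dead here: the module-level tlds is set([]), so its
-- membership test never fires) and returns the last one/two tokens directly. Return-value
-- equivalence; neither version mutates anything.

-- ===== PORT A =====
-- module-level constant: tlds = set([])
def tlds : PySem.Set String := PySem.Set.ofList []

-- the 'for i in range(2,7)' loop of A, with its two early returns;
-- both negative indexings are guarded (len ≥ i resp. len > i), so pyGetD with default "" is exact
def cleanLoopA (tokens : List String) : List Int → String → String → String → String → String × String
  | [], tld_, _tmp_tld_, domain_, _tmp_domain_ => (domain_, tld_)
  | i :: rest, tld_, tmp_tld_, domain_, tmp_domain_ =>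
    if (tokens.length : Int) < i then (domain_, tld_)
    else
      let tmp_domain_' := if (tokens.length : Int) > i
        then PySem.List.pyGetD tokens ((i + 1) * -1) "" ++ "." ++ tmp_domain_
        else tmp_domain_
      let tmp_tld_' := PySem.List.pyGetD tokens (i * -1) "" ++ "." ++ tmp_tld_
      if PySem.Set.contains tlds tmp_tld_' then
        cleanLoopA tokens rest tmp_tld_' tmp_tld_' tmp_tld_' tmp_domain_'
      else
        cleanLoopA tokens rest tld_ tmp_tld_' domain_ tmp_domain_'

def clean_hostname (hostname : Option String) : String × String :=
  match hostname with
  | none => ("None", "None")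
  | some h =>
    if h = "None" then ("None", "None")
    else
      -- split? is none only for sep = ""; sep is "." so getD [] is exact
      let tokens_ := (PySem.Str.split? h ".").getD []
      -- tokens_[-1]: split always yields a nonempty list, so the default "" is never used
      let tld_ := PySem.List.pyGetD tokens_ (-1) ""
      let tmp_tld_ := PySem.List.pyGetD tokens_ (-1) ""
      let domain_ := PySem.List.pyGetD tokens_ (-1) ""
      let tmp_domain_ := PySem.List.pyGetD tokens_ (-1) ""
      let domain_ := if tokens_.length > 1
        then PySem.List.pyGetD tokens_ (-2) "" ++ "." ++ domain_ else domain_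
      let tmp_domain_ := if tokens_.length > 1
        then PySem.List.pyGetD tokens_ (-2) "" ++ "." ++ tmp_domain_ else tmp_domain_
      cleanLoopA tokens_ (PySem.List.pyRange 2 7 1) tld_ tmp_tld_ domain_ tmp_domain_

-- ===== PORT B =====
def clean_hostname_alt (hostname : Option String) : String × String :=
  match hostname with
  | none => ("None", "None")
  | some h =>
    if h = "None" then ("None", "None")
    else
      let tokens := (PySem.Str.split? h ".").getD []
      (PySem.Str.join "." (PySem.List.slice tokens (some (-2)) none),
       PySem.List.pyGetD tokens (-1) "")

-- ===== PRECONDITION & SPEC =====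
def Spec_clean_hostname (hostname : Option String) (out : String × String) : Prop := out = clean_hostname_alt hostname
instance (hostname : Option String) (out : String × String) : Decidable (Spec_clean_hostname hostname out) := by unfold Spec_clean_hostname; infer_instance

-- ===== CLAIM (what is proved, stated in full; the proofs are below) =====
def Claim_equal_clean_hostname : Prop := ∀ (hostname : Option String), Dom_clean_hostname hostname → Spec_clean_hostname hostname (clean_hostname hostname)

-- ===== LEMMAS AND PROOFS =====

-- the membership test is against the empty set, so the loop never changes (domain_, tld_)
theorem cleanLoopA_const (tokens : List String) (is : List Int) :
    ∀ (tld tmp_tld domain tmp_domain : String),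
      cleanLoopA tokens is tld tmp_tld domain tmp_domain = (domain, tld) := by
  induction is with
  | nil => intro tld tmp_tld domain tmp_domain; rfl
  | cons i rest ih =>
    intro tld tmp_tld domain tmp_domain
    have hc : ∀ z : String, PySem.Set.contains tlds z = false := by
      intro z; simp [tlds, PySem.Set.contains, PySem.Set.ofList, PySem.Set.empty]
    simp only [cleanLoopA, hc, Bool.false_eq_true, if_false]
    split
    · rfl
    · exact ih _ _ _ _

-- every list is [], [a], or l ++ [x, y]
theorem list_last_two (tokens : List String) :
    tokens = [] ∨ (∃ a, tokens = [a]) ∨ ∃ l x y, tokens = l ++ [x, y] := by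
  rcases h : tokens.reverse with _ | ⟨y, _ | ⟨x, r⟩⟩
  · left; simpa using congrArg List.reverse h
  · right; left; exact ⟨y, by simpa using congrArg List.reverse h⟩
  · right; right
    refine ⟨r.reverse, x, y, ?_⟩
    have := congrArg List.reverse h
    simpa using this

theorem join_two (x y : String) : PySem.Str.join "." [x, y] = x ++ "." ++ y := by
  apply String.toList_injective
  simp [PySem.Str.toList_join, PySem.Chars.join_cons_cons, PySem.Chars.join_singleton]

-- ===== VERDICT (by name: the statement is the Claim_ definition above) =====
theorem clean_hostname_spec : Claim_equal_clean_hostname := by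
  intro hostname _
  unfold Spec_clean_hostname clean_hostname clean_hostname_alt
  cases hostname with
  | none => rfl
  | some h =>
    by_cases hn : h = "None"
    · simp [hn]
    · simp only [hn, if_false]
      rw [cleanLoopA_const]
      rw [PySem.List.slice_from_neg_ofNat _ 2 (by omega)]
      generalize (PySem.Str.split? h ".").getD [] = tokens
      rcases list_last_two tokens with h0 | ⟨a, h1⟩ | ⟨l, x, y, h2⟩
      · rw [h0]; rfl
      · rw [h1]
        simp [PySem.Str.join, PySem.Chars.join_singleton, PySem.List.pyGetD,
          PySem.List.pyGet?_neg_one]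
      · rw [h2]
        have hl : (l ++ [x, y]).length = l.length + 2 := by simp
        have hdrop : (l ++ [x, y]).drop ((l ++ [x, y]).length - 2) = [x, y] := by
          rw [hl]; simp [List.drop_left]
        rw [hdrop, join_two]
        have h1 : PySem.List.pyGetD (l ++ [x, y]) (-1) "" = y := by
          have : l ++ [x, y] = (l ++ [x]) ++ [y] := by simp
          rw [this, PySem.List.pyGetD_neg_one_append_singleton]
        have h2' : PySem.List.pyGetD (l ++ [x, y]) (-2) "" = x := by
          rw [PySem.List.pyGetD_neg_ofNat _ 2 _ (by omega) (by simp)]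
          simp [hl]
        rw [h1, h2']
        simp [hl]
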